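-- pv_equiv track=rewrite | github.com/Theimx/Software-Engineering-Training | NSI/NSI_LESSON.py | older
-- ===== SOURCE A (Python) =====
-- def older(tab):
--     count = ''
--     maxi = tab[0][1]
--     for i in range(len(tab)) :
--         if tab[i][1] >= maxi :
--             count = tab[i][0]
--             maxi = tab[i][1]
--     return(count)
-- ===== SOURCE B (Python) =====
-- def older(tab):
--     return sorted(tab, key=lambda p: p[1])[-1][0]
-- ===== Notes on version B (the rewrite author's own statement) =====
-- stated objective: idiomatic
-- what changed: Replaces the manual running-max index loop by a stable ascending sort on the age field and taking the last element, whose name is returned (stability makes the last tied maximum win, as A's >= scan does).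
import Mathlib
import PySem

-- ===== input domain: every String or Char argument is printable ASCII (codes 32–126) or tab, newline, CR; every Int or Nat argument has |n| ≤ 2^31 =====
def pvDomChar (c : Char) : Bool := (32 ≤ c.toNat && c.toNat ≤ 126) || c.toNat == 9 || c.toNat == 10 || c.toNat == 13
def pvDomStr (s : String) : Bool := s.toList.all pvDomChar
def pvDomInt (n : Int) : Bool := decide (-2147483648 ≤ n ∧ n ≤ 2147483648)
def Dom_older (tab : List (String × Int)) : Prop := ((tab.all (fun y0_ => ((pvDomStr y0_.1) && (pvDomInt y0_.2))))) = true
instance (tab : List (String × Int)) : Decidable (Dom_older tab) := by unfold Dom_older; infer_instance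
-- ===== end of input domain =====

-- B replaces A's running-max index loop by a stable ascending sort on the age and taking the
-- last element's name (stability makes the last tied maximum win, matching A's >= scan).

-- ===== PORT A =====
def older (tab : List (String × Int)) : String :=
  match tab with
  | [] => ""          -- A raises IndexError on tab[0] here; excluded by Pre_older
  | (_, a0) :: _ =>
    -- count = ''; maxi = tab[0][1]; for i in range(len(tab)): if tab[i][1] >= maxi: count, maxi = tab[i]
    ((PySem.List.pyRange 0 (PySem.List.len tab) 1).foldl
      (fun (s : String × Int) i =>
        let p := PySem.List.pyGetD tab i ("", 0)
        if p.2 ≥ s.2 then (p.1, p.2) else s) ("", a0)).1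

-- ===== PORT B =====
def older_alt (tab : List (String × Int)) : String :=
  match PySem.List.pyGet? (PySem.List.sorted tab (fun p => p.2) false) (-1) with
  | some p => p.1
  | none => ""        -- sorted([])[-1] raises IndexError; excluded by Pre_older

-- ===== PRECONDITION & SPEC =====
-- Pre_ excludes only the empty list, on which both Pythons raise IndexError.
def Pre_older (tab : List (String × Int)) : Prop := tab ≠ []
instance (tab : List (String × Int)) : Decidable (Pre_older tab) := by unfold Pre_older; infer_instance
def pvWitness_older : (List (String × Int)) := [("bob", 3), ("ann", 5)]

def Spec_older (tab : List (String × Int)) (out : String) : Prop := out = older_alt tab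
instance (tab : List (String × Int)) (out : String) : Decidable (Spec_older tab out) := by unfold Spec_older; infer_instance

-- ===== CLAIM (what is proved, stated in full; the proofs are below) =====
def Claim_equal_older : Prop := ∀ (tab : List (String × Int)), Dom_older tab → Pre_older tab → Spec_older tab (older tab)

-- ===== LEMMAS AND PROOFS =====

-- the shared loop step: keep the later element on a tie
def pvStep (s p : String × Int) : String × Int := if p.2 ≥ s.2 then (p.1, p.2) else s

-- inserting a strictly smaller key never changes the last element
theorem pv_insertBy_getLast?_of_lt (x l : String × Int) :
    ∀ (ys : List (String × Int)), ys.getLast? = some l → x.2 < l.2 →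
      (PySem.List.insertBy (fun a b => decide (a.2 < b.2)) x ys).getLast? = some l := by
  intro ys
  induction ys with
  | nil => simp
  | cons y t ih =>
    intro hl hx
    cases t with
    | nil =>
      simp at hl; subst hl
      simp [PySem.List.insertBy, hx]
    | cons z t' =>
      rw [List.getLast?_cons_cons] at hl
      by_cases hb : x.2 < y.2
      · simp [PySem.List.insertBy, hb]
        exact hl
      · have hrec := ih hl hx
        have hunf : PySem.List.insertBy (fun a b => decide (a.2 < b.2)) x (y :: z :: t')
            = y :: PySem.List.insertBy (fun a b => decide (a.2 < b.2)) x (z :: t') := by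
          conv_lhs => rw [PySem.List.insertBy]
          rw [if_neg (by simpa using hb)]
        rw [hunf]
        cases h' : PySem.List.insertBy (fun a b => decide (a.2 < b.2)) x (z :: t') with
        | nil => rw [h'] at hrec; simp at hrec
        | cons w ws =>
          rw [h'] at hrec
          rw [List.getLast?_cons_cons]
          exact hrec

-- every element of a sorted list has key ≤ the last element's key
theorem pv_sorted_le_last (zs : List (String × Int)) (l : String × Int)
    (hl : (PySem.List.sorted zs (fun p => p.2) false).getLast? = some l) :
    ∀ y ∈ PySem.List.sorted zs (fun p => p.2) false, y.2 ≤ l.2 := by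
  intro y hy
  obtain ⟨p, hp, hpy⟩ := List.mem_iff_getElem.mp hy
  have hne : PySem.List.sorted zs (fun p => p.2) false ≠ [] := by
    intro h; simp [h] at hl
  have hlen : 0 < (PySem.List.sorted zs (fun p => p.2) false).length :=
    List.length_pos_iff.mpr hne
  rw [List.getLast?_eq_getElem?, List.getElem?_eq_getElem (by omega)] at hl
  have hl' := Option.some.inj hl
  have hmono := PySem.List.key_sorted_getElem_mono zs (fun p => p.2) (p := p)
    (q := (PySem.List.sorted zs (fun p => p.2) false).length - 1) (by omega) (by omega)
  rw [hl'] at hmono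
  simpa [hpy] using hmono

-- the last element of the stable ascending sort is the running >=-max of the list
theorem pv_sorted_getLast (xs : List (String × Int)) (a : String × Int) :
    (PySem.List.sorted (a :: xs) (fun p => p.2) false).getLast? = some (xs.foldl pvStep a) := by
  induction xs using List.reverseRecOn with
  | nil =>
    simp [PySem.List.sorted_eq_foldl_insertBy, PySem.List.insertBy]
  | append_singleton xs x ih =>
    have hsplit : PySem.List.sorted (a :: (xs ++ [x])) (fun p => p.2) false
        = PySem.List.insertBy (fun p q => decide (p.2 < q.2)) x
            (PySem.List.sorted (a :: xs) (fun p => p.2) false) := by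
      rw [PySem.List.sorted_eq_foldl_insertBy, PySem.List.sorted_eq_foldl_insertBy]
      show List.foldl _ [] ((a :: xs) ++ [x]) = _
      rw [List.foldl_append]
      simp
    rw [hsplit]
    set l := xs.foldl pvStep a with hldef
    have hfold : (xs ++ [x]).foldl pvStep a = pvStep l x := by
      rw [List.foldl_append]; rfl
    rw [hfold]
    by_cases hx : x.2 < l.2
    · have : pvStep l x = l := by
        simp [pvStep]; omega
      rw [this]
      exact pv_insertBy_getLast?_of_lt x l _ ih hx
    · have hstep : pvStep l x = (x.1, x.2) := by
        simp [pvStep]; omega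
      have hall : ∀ y ∈ PySem.List.sorted (a :: xs) (fun p => p.2) false,
          (fun p q => decide (p.2 < q.2)) x y = false := by
        intro y hy
        have := pv_sorted_le_last (a :: xs) l ih y hy
        simp; omega
      rw [PySem.List.insertBy_of_forall_not_before _ _ _ hall, List.getLast?_concat, hstep]

-- xs[-1] is getLast? on a nonempty list
theorem pv_pyGet_neg_one (ys : List (String × Int)) (h : ys ≠ []) :
    PySem.List.pyGet? ys (-1) = ys.getLast? := by
  have hlen : 0 < ys.length := List.length_pos_iff.mpr h
  simp only [PySem.List.pyGet?, PySem.List.pyIdx?, List.getLast?_eq_getElem?]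
  rw [if_neg (by omega), if_pos (by omega)]
  have : ys.length - (-(-1 : Int)).toNat = ys.length - 1 := by omega
  rw [this, Option.bind_some]

-- A's index loop is the direct running >=-max fold over the list
theorem pv_older_eq_fold (n0 : String) (a0 : Int) (rest : List (String × Int)) :
    older ((n0, a0) :: rest) = (rest.foldl pvStep (n0, a0)).1 := by
  show ((PySem.List.pyRange 0 (PySem.List.len ((n0, a0) :: rest)) 1).foldl
      (fun (s : String × Int) i =>
        pvStep s (PySem.List.pyGetD ((n0, a0) :: rest) i ("", 0))) ("", a0)).1 = _
  rw [PySem.List.foldl_pyRange_zero_pyGetD ((n0, a0) :: rest) ("", 0) pvStep ("", a0)]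
  have : pvStep ("", a0) (n0, a0) = (n0, a0) := by simp [pvStep]
  rw [List.foldl_cons, this]

-- ===== VERDICT (by name: the statement is the Claim_ definition above) =====
theorem older_spec : Claim_equal_older := by
  intro tab _ hpre
  unfold Spec_older
  match tab with
  | [] => exact absurd rfl hpre
  | (n0, a0) :: rest =>
    have hsort := pv_sorted_getLast rest (n0, a0)
    have hne : PySem.List.sorted ((n0, a0) :: rest) (fun p => p.2) false ≠ [] := by
      intro h
      exact (List.cons_ne_nil _ _)
        ((PySem.List.sorted_eq_nil_iff ((n0, a0) :: rest) (fun p => p.2) false).mp h)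
    rw [pv_older_eq_fold]
    unfold older_alt
    rw [pv_pyGet_neg_one _ hne, hsort]
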